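-- pv_equiv track=rewrite | github.com/lindo-zy/leetcode | 备考/地铁闸机.py | station
-- ===== SOURCE A (Python) =====
-- from collections import deque
--
-- def station(arr_time, directs):
--     # 出站队列
--     out_queue = deque()
--     # 入站队列
--     in_queue = deque()
--     # 预处理
--     n = len(arr_time)
--     for i in range(n):
--         if directs[i] == 1:
--             out_queue.append([arr_time[i], i])
--         else:
--             in_queue.append([arr_time[i], i])
--     cur_time = 0
--     ans = [0] * n
--     while out_queue or in_queue:
--         out = False
--         # 先出站
--         while out_queue and out_queue[0][0] <= cur_time:
--             index = out_queue.popleft()[1]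
--             ans[index] = cur_time
--             cur_time += 1
--             out = True
--         # 后入站
--         while in_queue and in_queue[0][0] <= cur_time:
--             index = in_queue.popleft()[1]
--             ans[index] = cur_time
--             cur_time += 1
--             out = True
--         if not out:
--             cur_time += 1
--     return ans
-- ===== SOURCE B (Python) =====
-- def station(arr_time, directs):
--     # One flat pass: a state machine over cursors into the two partitions.
--     # in_batch remembers whether we are inside a run of entering passengers
--     # (an entering run keeps going even when an exiting passenger becomes due);
--     # the clock jumps straight to the earliest waiting arrival when idle.
--     outs = [(t, i) for i, (t, d) in enumerate(zip(arr_time, directs)) if d == 1]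
--     ins = [(t, i) for i, (t, d) in enumerate(zip(arr_time, directs)) if d != 1]
--     ans = [0] * len(arr_time)
--     oi = ii = 0
--     t = 0
--     in_batch = False
--     while oi < len(outs) or ii < len(ins):
--         if in_batch and ii < len(ins) and ins[ii][0] <= t:
--             ans[ins[ii][1]] = t
--             ii += 1
--             t += 1
--         elif oi < len(outs) and outs[oi][0] <= t:
--             ans[outs[oi][1]] = t
--             oi += 1
--             t += 1
--             in_batch = False
--         elif ii < len(ins) and ins[ii][0] <= t:
--             ans[ins[ii][1]] = t
--             ii += 1
--             t += 1
--             in_batch = True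
--         else:
--             t = min(q[c][0] for q, c in ((outs, oi), (ins, ii)) if c < len(q))
--             in_batch = False
--     return ans
-- ===== Notes on version B (the rewrite author's own statement) =====
-- stated objective: alternative
-- what changed: B replaces A's nested batch-drain while-loops with a single flat state machine: one loop that serves exactly one passenger per iteration using cursors and an in_batch mode flag (the flag preserves A's rule that an entering run continues even when an exit becomes due), and jumps the clock directly to the earliest waiting arrival instead of ticking cur_time += 1 through idle seconds.
-- outside the precondition, e.g. on station([1, 2], [1]): A raises IndexError, B returns [1, 0]
import Mathlib
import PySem

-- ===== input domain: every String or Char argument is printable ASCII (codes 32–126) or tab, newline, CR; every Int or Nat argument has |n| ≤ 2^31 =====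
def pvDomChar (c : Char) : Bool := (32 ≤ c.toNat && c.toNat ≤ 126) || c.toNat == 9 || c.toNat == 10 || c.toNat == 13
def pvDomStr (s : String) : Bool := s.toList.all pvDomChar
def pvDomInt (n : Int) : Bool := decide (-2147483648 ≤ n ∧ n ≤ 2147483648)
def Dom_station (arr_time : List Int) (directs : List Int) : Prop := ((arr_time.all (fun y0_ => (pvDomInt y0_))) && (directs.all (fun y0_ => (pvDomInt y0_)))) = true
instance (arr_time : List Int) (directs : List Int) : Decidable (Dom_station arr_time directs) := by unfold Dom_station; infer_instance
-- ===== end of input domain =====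

-- B replaces A's nested batch-drain while-loops by a single flat state machine that serves one
-- passenger per step (an in_batch flag preserving the rule that an entering run continues even
-- when an exit becomes due) and jumps the clock to the earliest waiting arrival when idle.

-- ===== PORT A =====
-- the preprocessing 'for i in range(n): if directs[i] == 1: …' building the two deques;
-- directs[i] is in range under Pre_station, so the default of pyGetD is never used there
def splitA (arr : List Int) (directs : List Int) (i : Nat) : List (Int × Nat) × List (Int × Nat) :=
  match arr with
  | [] => ([], [])
  | a :: rest =>
    let r := splitA rest directs (i + 1)
    if PySem.List.pyGetD directs (i : Int) 0 = 1 then ((a, i) :: r.1, r.2) else (r.1, (a, i) :: r.2)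

-- one inner 'while queue and queue[0][0] <= cur_time' loop of A (returns queue, cur_time, ans, out-flag)
def drainA : List (Int × Nat) → Int → List Int → List (Int × Nat) × Int × List Int × Bool
  | [], t, ans => ([], t, ans, false)
  | (a, i) :: rest, t, ans =>
      if a ≤ t then
        let r := drainA rest (t + 1) (ans.set i t)
        (r.1, r.2.1, r.2.2.1, true)
      else ((a, i) :: rest, t, ans, false)

-- A's outer 'while out_queue or in_queue' loop; the fuel is only a totality guard
-- (A's loop performs at most #elements + max arrival + 1 iterations)
def loopA : Nat → List (Int × Nat) → List (Int × Nat) → Int → List Int → List Int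
  | 0, _, _, _, ans => ans
  | f + 1, oq, iq, t, ans =>
      if oq.isEmpty && iq.isEmpty then ans
      else
        let r1 := drainA oq t ans
        let r2 := drainA iq r1.2.1 r1.2.2.1
        loopA f r1.1 r2.1 (if r1.2.2.2 || r2.2.2.2 then r2.2.1 else r2.2.1 + 1) r2.2.2.1

-- max arrival time in a queue, floored at 0 (used only to size loopA's fuel)
def maxT (q : List (Int × Nat)) : Int := q.foldr (fun p m => max p.1 m) 0

def station (arr_time : List Int) (directs : List Int) : List Int :=
  let qs := splitA arr_time directs 0
  let fuel := qs.1.length + qs.2.length + (max (maxT qs.1) (maxT qs.2)).toNat + 1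
  loopA fuel qs.1 qs.2 0 (List.replicate arr_time.length 0)

-- ===== PORT B =====
-- Source B keeps cursors oi/ii into the two partition lists; here each cursor is rendered as the
-- corresponding list consumed from its head, so 'q[c]' is the head and 'c += 1' is '.tail'.
-- 'c < len(q) and q[c][0] <= t' (the front is due)
def flagB (q : List (Int × Nat)) (t : Int) : Bool :=
  match q with
  | [] => false
  | (a, _) :: _ => decide (a ≤ t)

-- index of the front passenger (only read when flagB holds, i.e. the list is nonempty)
def frontIdx (q : List (Int × Nat)) : Nat := (q.headD (0, 0)).2

-- 'min(q[c][0] …)': the earliest front arrival among the nonempty queues (0 unused: only read when one queue is nonempty)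
def minFront : List (Int × Nat) → List (Int × Nat) → Int
  | [], [] => 0
  | (a, _) :: _, [] => a
  | [], (b, _) :: _ => b
  | (a, _) :: _, (b, _) :: _ => min a b

-- termination facts for loopB: after the jump some front is due, so the next step serves
theorem minFront_due (oq iq : List (Int × Nat)) (h : ¬(oq = [] ∧ iq = [])) :
    (flagB oq (minFront oq iq) || flagB iq (minFront oq iq)) = true := by
  match oq, iq with
  | [], [] => exact absurd ⟨rfl, rfl⟩ h
  | (a, _) :: _, [] => simp [flagB, minFront]
  | [], (b, _) :: _ => simp [flagB, minFront]
  | (a, _) :: _, (b, _) :: _ => simp [flagB, minFront]; omega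

theorem flagB_ne_nil (q : List (Int × Nat)) (t : Int) (h : flagB q t = true) : q ≠ [] := by
  intro he; subst he; simp [flagB] at h

-- B's single 'while oi < len(outs) or ii < len(ins)' loop: one passenger per step, or a jump
def loopB (oq iq : List (Int × Nat)) (t : Int) (inb : Bool) (ans : List Int) : List Int :=
  if oq = [] ∧ iq = [] then ans
  else if inb && flagB iq t then
    loopB oq iq.tail (t + 1) true (ans.set (frontIdx iq) t)
  else if flagB oq t then
    loopB oq.tail iq (t + 1) false (ans.set (frontIdx oq) t)
  else if flagB iq t then
    loopB oq iq.tail (t + 1) true (ans.set (frontIdx iq) t)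
  else loopB oq iq (minFront oq iq) false ans
termination_by 2 * (oq.length + iq.length) + (if flagB oq t || flagB iq t then 0 else 1)
decreasing_by
  · have hiq : iq ≠ [] := flagB_ne_nil iq t (by
      rcases Bool.and_eq_true_iff.mp (by assumption) with ⟨_, h⟩; exact h)
    have hl : iq.tail.length + 1 = iq.length := by
      cases iq with | nil => exact absurd rfl hiq | cons a r => simp
    have h1 : (if flagB oq (t+1) || flagB iq.tail (t+1) then 0 else 1) ≤ 1 := by split <;> omega
    omega
  · have hoq : oq ≠ [] := flagB_ne_nil oq t (by assumption)
    have hl : oq.tail.length + 1 = oq.length := by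
      cases oq with | nil => exact absurd rfl hoq | cons a r => simp
    have h1 : (if flagB oq.tail (t+1) || flagB iq (t+1) then 0 else 1) ≤ 1 := by split <;> omega
    omega
  · have hiq : iq ≠ [] := flagB_ne_nil iq t (by assumption)
    have hl : iq.tail.length + 1 = iq.length := by
      cases iq with | nil => exact absurd rfl hiq | cons a r => simp
    have h1 : (if flagB oq (t+1) || flagB iq.tail (t+1) then 0 else 1) ≤ 1 := by split <;> omega
    omega
  · have hd := minFront_due oq iq (by assumption)
    have h1 : flagB oq t = false := by
      cases h : flagB oq t with
      | true => exact absurd h (by assumption)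
      | false => rfl
    have h2 : flagB iq t = false := by
      cases h : flagB iq t with
      | true => exact absurd h (by assumption)
      | false => rfl
    simp [hd, h1, h2]

def station_alt (arr_time : List Int) (directs : List Int) : List Int :=
  let outs := ((arr_time.zip directs).zipIdx).filterMap
    (fun p => if p.1.2 = 1 then some (p.1.1, p.2) else none)
  let ins := ((arr_time.zip directs).zipIdx).filterMap
    (fun p => if p.1.2 = 1 then none else some (p.1.1, p.2))
  loopB outs ins 0 false (List.replicate arr_time.length 0)

-- ===== PRECONDITION & SPEC =====
-- Pre_ excludes exactly the inputs where A raises IndexError: directs shorter than arr_time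
def Pre_station (arr_time : List Int) (directs : List Int) : Prop :=
  arr_time.length ≤ directs.length
instance (arr_time : List Int) (directs : List Int) : Decidable (Pre_station arr_time directs) := by
  unfold Pre_station; infer_instance

def pvWitness_station : List Int × List Int := ([2, 0, 1], [1, 0, 1])

def Spec_station (arr_time : List Int) (directs : List Int) (out : List Int) : Prop := out = station_alt arr_time directs
instance (arr_time : List Int) (directs : List Int) (out : List Int) : Decidable (Spec_station arr_time directs out) := by unfold Spec_station; infer_instance

-- ===== CLAIM =====
def Claim_equal_station : Prop := ∀ (arr_time : List Int) (directs : List Int), Dom_station arr_time directs → Pre_station arr_time directs → Spec_station arr_time directs (station arr_time directs)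

-- ===== LEMMAS AND PROOFS =====

-- proof-side model of one full drain of A's inner while loop (queue, time, ans after the batch)
def drainB : List (Int × Nat) → Int → List Int → List (Int × Nat) × Int × List Int
  | [], t, ans => ([], t, ans)
  | (a, i) :: rest, t, ans =>
      if a ≤ t then drainB rest (t + 1) (ans.set i t)
      else ((a, i) :: rest, t, ans)

theorem drainA_eq (q : List (Int × Nat)) (t : Int) (ans : List Int) :
    drainA q t ans =
      ((drainB q t ans).1, (drainB q t ans).2.1, (drainB q t ans).2.2, flagB q t) := by
  induction q generalizing t ans with
  | nil => simp [drainA, drainB, flagB]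
  | cons p rest ih =>
    obtain ⟨a, i⟩ := p
    by_cases h : a ≤ t
    · simp [drainA, drainB, flagB, h, ih]
    · simp [drainA, drainB, flagB, h]

theorem drainB_noop (q : List (Int × Nat)) (t : Int) (ans : List Int)
    (h : flagB q t = false) : drainB q t ans = (q, t, ans) := by
  match q with
  | [] => simp [drainB]
  | (a, i) :: rest =>
    simp only [flagB, decide_eq_false_iff_not, not_le] at h
    simp [drainB, not_le.mpr h]

theorem drainB_len_le (q : List (Int × Nat)) (t : Int) (ans : List Int) :
    (drainB q t ans).1.length ≤ q.length := by
  induction q generalizing t ans with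
  | nil => simp [drainB]
  | cons p rest ih =>
    obtain ⟨a, i⟩ := p
    by_cases h : a ≤ t
    · simpa [drainB, h] using Nat.le_succ_of_le (ih (t + 1) (ans.set i t))
    · simp [drainB, h]

theorem drainB_time (q : List (Int × Nat)) (t : Int) (ans : List Int) :
    (drainB q t ans).2.1 = t + (q.length : Int) - ((drainB q t ans).1.length : Int) := by
  induction q generalizing t ans with
  | nil => simp [drainB]
  | cons p rest ih =>
    obtain ⟨a, i⟩ := p
    by_cases h : a ≤ t
    · have hle := drainB_len_le rest (t + 1) (ans.set i t)
      have hrec := ih (t + 1) (ans.set i t)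
      simp only [drainB, if_pos h, List.length_cons]
      omega
    · simp [drainB, h]

theorem drainB_post (q : List (Int × Nat)) (t : Int) (ans : List Int) :
    flagB (drainB q t ans).1 (drainB q t ans).2.1 = false := by
  induction q generalizing t ans with
  | nil => simp [drainB, flagB]
  | cons p rest ih =>
    obtain ⟨a, i⟩ := p
    by_cases h : a ≤ t
    · simpa [drainB, h] using ih (t + 1) (ans.set i t)
    · simp [drainB, h, flagB]

theorem flag_drain_lt (q : List (Int × Nat)) (t : Int) (ans : List Int)
    (h : flagB q t = true) : (drainB q t ans).1.length < q.length := by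
  match q with
  | [] => simp [flagB] at h
  | (a, i) :: rest =>
    simp only [flagB, decide_eq_true_eq] at h
    simpa [drainB, h] using Nat.lt_succ_of_le (drainB_len_le rest (t + 1) (ans.set i t))

theorem le_maxT (q : List (Int × Nat)) (a : Int) (i : Nat) (h : (a, i) ∈ q) : a ≤ maxT q := by
  induction q with
  | nil => simp at h
  | cons p rest ih =>
    simp only [List.mem_cons] at h
    rcases h with h | h
    · simp [maxT, ← h]
    · simp only [maxT, List.foldr_cons]
      exact le_trans (ih h) (le_max_right _ _)

theorem maxT_nonneg (q : List (Int × Nat)) : 0 ≤ maxT q := by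
  induction q with
  | nil => simp [maxT]
  | cons p rest ih => simp only [maxT, List.foldr_cons] at *; omega

theorem drainB_sublist (q : List (Int × Nat)) (t : Int) (ans : List Int) :
    (drainB q t ans).1.Sublist q := by
  induction q generalizing t ans with
  | nil => simp [drainB]
  | cons p rest ih =>
    obtain ⟨a, i⟩ := p
    by_cases h : a ≤ t
    · simpa [drainB, h] using (ih (t + 1) (ans.set i t)).trans (List.sublist_cons_self _ _)
    · simp [drainB, h]

theorem maxT_sublist (l q : List (Int × Nat)) (h : l.Sublist q) : maxT l ≤ maxT q := by
  induction h with
  | slnil => exact le_refl _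
  | cons p hs ih => simp only [maxT, List.foldr_cons] at *; omega
  | cons₂ p hs ih => simp only [maxT, List.foldr_cons] at *; omega

theorem maxT_drainB (q : List (Int × Nat)) (t : Int) (ans : List Int) :
    maxT (drainB q t ans).1 ≤ maxT q := maxT_sublist _ _ (drainB_sublist q t ans)

theorem minFront_le_of_flag_left (oq iq : List (Int × Nat)) (t : Int)
    (h : flagB oq t = true) : minFront oq iq ≤ t := by
  match oq, iq with
  | [], _ => simp [flagB] at h
  | (a, _) :: _, [] => simp only [flagB, decide_eq_true_eq] at h; simpa [minFront] using h
  | (a, _) :: _, (b, _) :: _ =>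
    simp only [flagB, decide_eq_true_eq] at h
    simp only [minFront]; omega

theorem minFront_le_of_flag_right (oq iq : List (Int × Nat)) (t : Int)
    (h : flagB iq t = true) : minFront oq iq ≤ t := by
  match oq, iq with
  | _, [] => simp [flagB] at h
  | [], (b, _) :: _ => simp only [flagB, decide_eq_true_eq] at h; simpa [minFront] using h
  | (a, _) :: _, (b, _) :: _ =>
    simp only [flagB, decide_eq_true_eq] at h
    simp only [minFront]; omega

-- with the entering queue's front not due, the mode flag is irrelevant
theorem loopB_true_false (oq iq : List (Int × Nat)) (t : Int) (ans : List Int)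
    (h : flagB iq t = false) : loopB oq iq t true ans = loopB oq iq t false ans := by
  conv_lhs => rw [loopB.eq_def]
  conv_rhs => rw [loopB.eq_def]
  simp only [h, Bool.true_and, Bool.false_and, Bool.false_eq_true, if_false]

-- an entering run in state true = one full drain of iq, ending in state false
theorem loopB_in_true (iq : List (Int × Nat)) (oq : List (Int × Nat)) (t : Int) (ans : List Int) :
    loopB oq iq t true ans =
      loopB oq (drainB iq t ans).1 (drainB iq t ans).2.1 false (drainB iq t ans).2.2 := by
  induction iq generalizing t ans with
  | nil => exact loopB_true_false oq [] t ans rfl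
  | cons p rest ih =>
    obtain ⟨a, i⟩ := p
    by_cases h : a ≤ t
    · have hne : ¬(oq = [] ∧ (a, i) :: rest = []) := by simp
      have hf : (true && flagB ((a, i) :: rest) t) = true := by simp [flagB, h]
      conv_lhs => rw [loopB.eq_def]
      rw [if_neg hne, if_pos hf]
      simp only [List.tail_cons, frontIdx, List.headD_cons]
      rw [ih (t + 1) (ans.set i t)]
      simp [drainB, h]
    · have hf : flagB ((a, i) :: rest) t = false := by simp [flagB]; omega
      rw [loopB_true_false oq _ t ans hf, drainB_noop _ t ans hf]

-- an exiting run in state false = one full drain of oq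
theorem loopB_out (oq : List (Int × Nat)) (iq : List (Int × Nat)) (t : Int) (ans : List Int) :
    loopB oq iq t false ans =
      loopB (drainB oq t ans).1 iq (drainB oq t ans).2.1 false (drainB oq t ans).2.2 := by
  induction oq generalizing t ans with
  | nil => rfl
  | cons p rest ih =>
    obtain ⟨a, i⟩ := p
    by_cases h : a ≤ t
    · have hne : ¬((a, i) :: rest = [] ∧ iq = []) := by simp
      have hf : (flagB ((a, i) :: rest) t) = true := by simp [flagB, h]
      conv_lhs => rw [loopB.eq_def]
      rw [if_neg hne, if_neg (by simp), if_pos hf]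
      simp only [List.tail_cons, frontIdx, List.headD_cons]
      rw [ih (t + 1) (ans.set i t)]
      simp [drainB, h]
    · have hf : flagB ((a, i) :: rest) t = false := by simp [flagB]; omega
      rw [drainB_noop _ t ans hf]

-- after the exits are done, an entering run from state false also drains iq
theorem loopB_in_false (oq iq : List (Int × Nat)) (t : Int) (ans : List Int)
    (ho : flagB oq t = false) :
    loopB oq iq t false ans =
      loopB oq (drainB iq t ans).1 (drainB iq t ans).2.1 false (drainB iq t ans).2.2 := by
  by_cases hi : flagB iq t = true
  · have hiq : iq ≠ [] := flagB_ne_nil iq t hi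
    have hne : ¬(oq = [] ∧ iq = []) := by rintro ⟨_, h2⟩; exact hiq h2
    conv_lhs => rw [loopB.eq_def]
    rw [if_neg hne, if_neg (by simp), if_neg (by simp [ho]), if_pos hi]
    rw [loopB_in_true]
    cases iq with
    | nil => exact absurd rfl hiq
    | cons p rest =>
      obtain ⟨a, i⟩ := p
      have h : a ≤ t := by simpa [flagB] using hi
      simp [drainB, h, frontIdx]
  · rw [drainB_noop _ t ans (by simpa using hi)]

-- B's jump is invariant under one idle tick of A
theorem loopB_idle (oq iq : List (Int × Nat)) (t : Int) (ans : List Int)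
    (h1 : flagB oq t = false) (h2 : flagB iq t = false) (hne : ¬(oq = [] ∧ iq = [])) :
    loopB oq iq (t + 1) false ans = loopB oq iq t false ans := by
  have hm : t + 1 ≤ minFront oq iq := by
    match oq, iq with
    | [], [] => exact absurd ⟨rfl, rfl⟩ hne
    | (a, _) :: _, [] => simp only [flagB, decide_eq_false_iff_not, not_le] at h1; simp [minFront]; omega
    | [], (b, _) :: _ => simp only [flagB, decide_eq_false_iff_not, not_le] at h2; simp [minFront]; omega
    | (a, _) :: _, (b, _) :: _ =>
      simp only [flagB, decide_eq_false_iff_not, not_le] at h1 h2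
      simp only [minFront]; omega
  conv_rhs => rw [loopB.eq_def]
  simp only [Bool.false_and, Bool.false_eq_true, if_false, h1, h2, if_neg hne]
  by_cases hdue : (flagB oq (t + 1) || flagB iq (t + 1)) = true
  · have hle : minFront oq iq ≤ t + 1 := by
      rcases Bool.or_eq_true_iff.mp hdue with h | h
      · exact minFront_le_of_flag_left oq iq (t + 1) h
      · exact minFront_le_of_flag_right oq iq (t + 1) h
    have : minFront oq iq = t + 1 := le_antisymm hle hm
    rw [this]
  · have h1' : flagB oq (t + 1) = false := by
      rcases Bool.or_eq_false_iff.mp (by simpa using hdue) with ⟨h, _⟩; exact h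
    have h2' : flagB iq (t + 1) = false := by
      rcases Bool.or_eq_false_iff.mp (by simpa using hdue) with ⟨_, h⟩; exact h
    rw [loopB.eq_def]
    simp only [Bool.false_and, Bool.false_eq_true, if_false, h1', h2', if_neg hne]

-- the main simulation lemma: with enough fuel, A's outer loop equals B's state machine
theorem loopA_eq_loopB (f : Nat) (oq iq : List (Int × Nat)) (t : Int) (ans : List Int)
    (hf : oq.length + iq.length + (max (maxT oq) (maxT iq) - t).toNat < f) :
    loopA f oq iq t ans = loopB oq iq t false ans := by
  induction f generalizing oq iq t ans with
  | zero => omega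
  | succ f ih =>
    by_cases hq : oq = [] ∧ iq = []
    · obtain ⟨h1, h2⟩ := hq
      subst h1; subst h2
      rw [loopB.eq_def]
      simp [loopA]
    · have hne : (oq.isEmpty && iq.isEmpty) = false := by
        rcases not_and_or.mp hq with h | h <;> simp [List.isEmpty_iff, h]
      simp only [loopA, hne, Bool.false_eq_true, if_false, drainA_eq]
      set t1 := (drainB oq t ans).2.1 with ht1
      by_cases hb : (flagB oq t || flagB iq t1) = true
      · -- a passenger is processed: both sides advance through the two drains
        simp only [hb, if_true]
        have hl1 := drainB_len_le oq t ans
        have hT1 := drainB_time oq t ans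
        have hM1 := maxT_drainB oq t ans
        have hl2 := drainB_len_le iq t1 (drainB oq t ans).2.2
        have hT2 := drainB_time iq t1 (drainB oq t ans).2.2
        have hM2 := maxT_drainB iq t1 (drainB oq t ans).2.2
        have hstrict : (drainB oq t ans).1.length +
            (drainB iq t1 (drainB oq t ans).2.2).1.length < oq.length + iq.length := by
          rcases Bool.or_eq_true_iff.mp hb with h | h
          · have := flag_drain_lt oq t ans h
            omega
          · have := flag_drain_lt iq t1 (drainB oq t ans).2.2 h
            omega
        rw [ih _ _ _ _ (by omega)]
        rw [loopB_out oq iq t ans,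
          loopB_in_false _ _ _ _ (drainB_post oq t ans)]
      · -- idle tick: nothing due, A advances the clock by one, B is unchanged
        have hb1 : flagB oq t = false := by
          rcases Bool.or_eq_false_iff.mp (by simpa using hb) with ⟨h, _⟩; exact h
        have hb2' : flagB iq t1 = false := by
          rcases Bool.or_eq_false_iff.mp (by simpa using hb) with ⟨_, h⟩; exact h
        have hno1 := drainB_noop oq t ans hb1
        have ht1t : t1 = t := by rw [ht1, hno1]
        have hb2 : flagB iq t = false := ht1t ▸ hb2'
        have hno2' := drainB_noop iq t ans hb2
        simp only [ht1t, hno1, hno2', hb1, hb2, Bool.or_self, Bool.false_eq_true, if_false]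
        have hgt : t < max (maxT oq) (maxT iq) := by
          rcases not_and_or.mp hq with h | h
          · match oq, hb1, h with
            | (a, i) :: o', hb1, _ =>
              simp only [flagB, decide_eq_false_iff_not, not_le] at hb1
              have := le_maxT ((a, i) :: o') a i (by simp)
              omega
          · match iq, hb2, h with
            | (b, j) :: i', hb2, _ =>
              simp only [flagB, decide_eq_false_iff_not, not_le] at hb2
              have := le_maxT ((b, j) :: i') b j (by simp)
              omega
        rw [ih _ _ _ _ (by omega)]
        exact loopB_idle oq iq t ans hb1 hb2 hq

-- the two preprocessings build the same queues (directs[i] in range under the length hypothesis)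
theorem split_eq (arr : List Int) (ds : List Int) (i : Nat) (h : arr.length + i ≤ ds.length) :
    splitA arr ds i =
      (((arr.zip (ds.drop i)).zipIdx i).filterMap
        (fun p => if p.1.2 = 1 then some (p.1.1, p.2) else none),
       ((arr.zip (ds.drop i)).zipIdx i).filterMap
        (fun p => if p.1.2 = 1 then none else some (p.1.1, p.2))) := by
  induction arr generalizing i with
  | nil => simp [splitA]
  | cons a rest ih =>
    have hi : i < ds.length := by simp at h; omega
    have hdrop : ds.drop i = ds[i] :: ds.drop (i + 1) := List.drop_eq_getElem_cons hi
    have hget : PySem.List.pyGetD ds (i : Int) 0 = ds[i] := by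
      rw [PySem.List.pyGetD_natCast]
      exact List.getD_eq_getElem ds 0 hi
    rw [splitA, ih (i + 1) (by simp at h ⊢; omega), hdrop, List.zip_cons_cons,
      List.zipIdx_cons, List.filterMap_cons, List.filterMap_cons]
    by_cases hc : ds[i] = 1
    · simp [hget, hc]
    · simp [hget, hc]

-- ===== VERDICT =====
theorem station_spec : Claim_equal_station := by
  intro arr ds _ hpre
  unfold Spec_station station station_alt
  rw [split_eq arr ds 0 (by simpa using hpre)]
  simp only [List.drop_zero]
  exact loopA_eq_loopB _ _ _ _ _ (by
    have h1 := maxT_nonneg (((arr.zip ds).zipIdx 0).filterMap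
      (fun p => if p.1.2 = 1 then some (p.1.1, p.2) else none))
    have h2 := maxT_nonneg (((arr.zip ds).zipIdx 0).filterMap
      (fun p => if p.1.2 = 1 then none else some (p.1.1, p.2)))
    omega)
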